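-- pv_equiv track=rewrite | github.com/leideng/CANN-8.1.RC1 | Ascend/ascend-toolkit/8.1.RC1/opp/built-in/op_impl/ai_core/tbe/impl/reverse_v2_d.py | get_max_factor
-- ===== SOURCE A (Python) =====
-- class Constant:
--     """
--     The class for constant
--     """
--     MAX_BLOCK_NUM = 65536
--
-- def get_max_factor(n):
--     """
--     Get max factor of n, the max factor is less than MAX_BLOCK_NUM
--
--     Parameters
--     ----------
--     n: an int number
--
--     Returns
--     -------
--     the max factor: -1 if not found
--     """
--     if n < Constant.MAX_BLOCK_NUM:
--         return n
--
--     factors = []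
--     for i in range(2, Constant.MAX_BLOCK_NUM):
--         if n % i == 0:
--             factors = factors + [i, ]
--
--     if len(factors) == 0:
--         return -1
--
--     return factors[-1]
-- ===== SOURCE B (Python) =====
-- class Constant:
--     """
--     The class for constant
--     """
--     MAX_BLOCK_NUM = 65536
--
--
-- def get_max_factor(n):
--     """Largest factor of n below MAX_BLOCK_NUM: scan downward, return first hit."""
--     if n < Constant.MAX_BLOCK_NUM:
--         return n
--     for d in range(Constant.MAX_BLOCK_NUM - 1, 1, -1):
--         if n % d == 0:
--             return d
--     return -1
-- ===== Notes on version B (the rewrite author's own statement) =====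
-- stated objective: simpler
-- what changed: A scans 2..65535 upward accumulating a list of all divisors and returns its last element; B scans 65535..2 downward and returns the first divisor it meets (early exit), no list built.
import Mathlib
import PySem

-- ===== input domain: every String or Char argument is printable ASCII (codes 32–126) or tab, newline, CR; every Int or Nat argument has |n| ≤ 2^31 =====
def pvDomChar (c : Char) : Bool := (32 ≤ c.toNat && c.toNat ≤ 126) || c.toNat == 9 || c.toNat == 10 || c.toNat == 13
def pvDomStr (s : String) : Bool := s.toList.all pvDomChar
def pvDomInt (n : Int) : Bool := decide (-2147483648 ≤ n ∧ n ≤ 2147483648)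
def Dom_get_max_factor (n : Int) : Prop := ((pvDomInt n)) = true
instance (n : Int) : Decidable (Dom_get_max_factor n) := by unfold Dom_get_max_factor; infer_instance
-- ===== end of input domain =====

-- B replaces A's forward scan that accumulates every divisor and keeps the last with a
-- downward scan that returns the first divisor found (early exit); same return value everywhere.

-- ===== PORT A =====
def get_max_factor (n : Int) : Int :=
  if n < 65536 then n
  else
    let factors := (PySem.List.pyRange 2 65536 1).foldl
      (fun acc i => if PySem.Int.mod n i == 0 then acc ++ [i] else acc) []
    if factors.length = 0 then -1
    -- factors[-1]: the branch guarantees factors ≠ [], so pyGet? is some; getD 0 never fires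
    else (PySem.List.pyGet? factors (-1)).getD 0

-- ===== PORT B =====
def get_max_factor_alt (n : Int) : Int :=
  if n < 65536 then n
  else
    -- 'for d in range(65535, 1, -1): if n % d == 0: return d' / fall-through 'return -1'
    match (PySem.List.pyRange 65535 1 (-1)).find? (fun d => PySem.Int.mod n d == 0) with
    | some d => d
    | none => -1

-- ===== PRECONDITION & SPEC =====
def Spec_get_max_factor (n : Int) (out : Int) : Prop := out = get_max_factor_alt n
instance (n : Int) (out : Int) : Decidable (Spec_get_max_factor n out) := by unfold Spec_get_max_factor; infer_instance

-- ===== CLAIM (what is proved, stated in full; the proofs are below) =====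
def Claim_equal_get_max_factor : Prop := ∀ (n : Int), Dom_get_max_factor n → Spec_get_max_factor n (get_max_factor n)

-- ===== LEMMAS AND PROOFS =====

-- first match of a reversed list = last match of the list
theorem find?_reverse_eq_getLast?_filter (l : List Int) (p : Int → Bool) :
    l.reverse.find? p = (l.filter p).getLast? := by
  rw [← List.head?_filter, List.filter_reverse, List.head?_reverse]

-- ===== VERDICT (by name: the statement is the Claim_ definition above) =====
theorem get_max_factor_spec : Claim_equal_get_max_factor := by
  intro n _
  unfold Spec_get_max_factor get_max_factor get_max_factor_alt
  by_cases h : n < 65536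
  · simp [h]
  · simp only [h, if_false]
    rw [PySem.List.foldl_append_if_eq_filter]
    rw [show PySem.List.pyRange 65535 1 (-1) = (PySem.List.pyRange 2 65536 1).reverse from
      PySem.List.pyRange_neg_one_eq_reverse 65535 1]
    rw [find?_reverse_eq_getLast?_filter, PySem.List.pyGet?_neg_one, List.nil_append]
    generalize (PySem.List.pyRange 2 65536 1).filter (fun i => PySem.Int.mod n i == 0) = l
    cases l with
    | nil => rfl
    | cons a t =>
      have hne : (a :: t : List Int) ≠ [] := by simp
      rw [List.getLast?_eq_some_getLast hne]
      simp
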